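-- pv_equiv track=rewrite | github.com/evanap003300/Quorum | src/core/orchestrator/solver/parsing.py | extract_result_from_text
-- ===== SOURCE A (Python) =====
-- from typing import List, Optional, Tuple, Union
--
-- def extract_result_from_text(text: str) -> Optional[str]:
--     """
--     Extract a result from plain text response.
--     Looks for patterns like "M kg", "10.0 m/s", JSON objects, etc.
--     Assumes the first meaningful line or last line contains the result.
--
--     Returns:
--         Extracted result string, or None if no result found
--     """
--     lines = text.strip().split('\n')
--
--     # First, look for JSON objects (for multi-output calculations)
--     for line in lines:
--         line = line.strip()
--         if line.startswith('{') and line.endswith('}'):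
--             # This looks like a JSON object
--             return line
--
--     # Try to find a line that looks like "value unit"
--     for line in lines:
--         line = line.strip()
--         # Skip empty lines and lines that are too short
--         if not line or len(line) < 1:
--             continue
--         # CRITICAL: Skip code fences and markdown markers
--         if line.startswith('```') or line.startswith('~~~'):
--             continue
--         # Skip lines that look like explanations
--         if line.lower().startswith(('the ', 'this ', 'here', 'example', 'note')):
--             continue
--         if line.endswith(':'):
--             continue
--         # This line might be our answer - check if it has word-like content
--         if line and not line.startswith('{') and not line.startswith('['):
--             # Found something that looks like a result
--             return line
--
--     # If we didn't find anything obvious, return the last non-empty line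
--     # But still skip code fences
--     for line in reversed(lines):
--         line = line.strip()
--         if line and not line.startswith('```') and not line.startswith('~~~'):
--             return line
--
--     return None
-- ===== SOURCE B (Python) =====
-- def _is_json_line(line):
--     return line.startswith('{') and line.endswith('}')
--
--
-- def _is_fence(line):
--     return line.startswith('```') or line.startswith('~~~')
--
--
-- def _is_value_line(line):
--     if not line or len(line) < 1:
--         return False
--     if _is_fence(line):
--         return False
--     if line.lower().startswith(('the ', 'this ', 'here', 'example', 'note')):
--         return False
--     if line.endswith(':'):
--         return False
--     return not line.startswith('{') and not line.startswith('[')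
--
--
-- def extract_result_from_text(text):
--     json_candidate = None
--     value_candidate = None
--     last_candidate = None
--     for raw in text.strip().split('\n'):
--         line = raw.strip()
--         if json_candidate is None and _is_json_line(line):
--             json_candidate = line
--         if value_candidate is None and _is_value_line(line):
--             value_candidate = line
--         if line and not _is_fence(line):
--             last_candidate = line
--     if json_candidate is not None:
--         return json_candidate
--     if value_candidate is not None:
--         return value_candidate
--     return last_candidate
-- ===== Notes on version B (the rewrite author's own statement) =====
-- stated objective: alternative
-- what changed: Replaces A's three sequential scans (forward for JSON, forward for a value line, backward for the last non-empty line) with one forward pass that maintains the three candidates simultaneously and picks them by priority at the end.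
import Mathlib
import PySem

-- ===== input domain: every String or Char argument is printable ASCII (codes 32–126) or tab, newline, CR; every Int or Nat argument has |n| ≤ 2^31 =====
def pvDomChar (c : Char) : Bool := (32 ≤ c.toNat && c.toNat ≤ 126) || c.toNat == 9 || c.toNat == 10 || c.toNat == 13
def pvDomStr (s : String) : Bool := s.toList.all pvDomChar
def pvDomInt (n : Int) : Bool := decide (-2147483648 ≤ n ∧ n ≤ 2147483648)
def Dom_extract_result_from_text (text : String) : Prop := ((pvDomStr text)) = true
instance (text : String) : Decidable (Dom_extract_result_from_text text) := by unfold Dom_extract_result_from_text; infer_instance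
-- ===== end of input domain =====

-- B replaces A's three sequential scans (two forward, one backward) by one forward pass
-- maintaining three candidates; same O(n) cost, a different decomposition.

-- ===== PORT A =====
-- first loop: look for a JSON-like line
def pvLoop1 : List String → Option String
  | [] => none
  | raw :: rest =>
    let line := PySem.Str.strip raw
    if PySem.Str.startswith line "{" && PySem.Str.endswith line "}" then some line
    else pvLoop1 rest

-- second loop: first "value unit"-looking line
def pvLoop2 : List String → Option String
  | [] => none
  | raw :: rest =>
    let line := PySem.Str.strip raw
    if line == "" || PySem.Str.len line < 1 then pvLoop2 rest
    else if PySem.Str.startswith line "```" || PySem.Str.startswith line "~~~" then pvLoop2 rest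
    else if PySem.Str.startswith (PySem.Str.lower line) "the " ||
            PySem.Str.startswith (PySem.Str.lower line) "this " ||
            PySem.Str.startswith (PySem.Str.lower line) "here" ||
            PySem.Str.startswith (PySem.Str.lower line) "example" ||
            PySem.Str.startswith (PySem.Str.lower line) "note" then pvLoop2 rest
    else if PySem.Str.endswith line ":" then pvLoop2 rest
    else if line != "" && !PySem.Str.startswith line "{" && !PySem.Str.startswith line "[" then some line
    else pvLoop2 rest

-- third loop: over reversed(lines), last non-empty non-fence line
def pvLoop3 : List String → Option String
  | [] => none
  | raw :: rest =>
    let line := PySem.Str.strip raw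
    if line != "" && !PySem.Str.startswith line "```" && !PySem.Str.startswith line "~~~" then some line
    else pvLoop3 rest

def extract_result_from_text (text : String) : Option String :=
  let lines := (PySem.Str.split? (PySem.Str.strip text) "\n").getD []
  match pvLoop1 lines with
  | some r => some r
  | none =>
    match pvLoop2 lines with
    | some r => some r
    | none => pvLoop3 lines.reverse

-- ===== PORT B =====
def pvIsJsonLine (line : String) : Bool :=
  PySem.Str.startswith line "{" && PySem.Str.endswith line "}"

def pvIsFence (line : String) : Bool :=
  PySem.Str.startswith line "```" || PySem.Str.startswith line "~~~"

def pvIsValueLine (line : String) : Bool :=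
  if line == "" || PySem.Str.len line < 1 then false
  else if pvIsFence line then false
  else if PySem.Str.startswith (PySem.Str.lower line) "the " ||
          PySem.Str.startswith (PySem.Str.lower line) "this " ||
          PySem.Str.startswith (PySem.Str.lower line) "here" ||
          PySem.Str.startswith (PySem.Str.lower line) "example" ||
          PySem.Str.startswith (PySem.Str.lower line) "note" then false
  else if PySem.Str.endswith line ":" then false
  else !PySem.Str.startswith line "{" && !PySem.Str.startswith line "["

-- the body of B's single loop
def pvStepB (st : Option String × Option String × Option String) (raw : String) :
    Option String × Option String × Option String :=
  let line := PySem.Str.strip raw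
  ((if st.1.isNone && pvIsJsonLine line then some line else st.1),
   (if st.2.1.isNone && pvIsValueLine line then some line else st.2.1),
   (if line != "" && !pvIsFence line then some line else st.2.2))

def extract_result_from_text_alt (text : String) : Option String :=
  let lines := (PySem.Str.split? (PySem.Str.strip text) "\n").getD []
  let st := lines.foldl pvStepB (none, none, none)
  match st.1 with
  | some r => some r
  | none =>
    match st.2.1 with
    | some r => some r
    | none => st.2.2

-- ===== PRECONDITION & SPEC =====
def Spec_extract_result_from_text (text : String) (out : Option String) : Prop := out = extract_result_from_text_alt text
instance (text : String) (out : Option String) : Decidable (Spec_extract_result_from_text text out) := by unfold Spec_extract_result_from_text; infer_instance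

-- ===== CLAIM (what is proved, stated in full; the proofs are below) =====
def Claim_equal_extract_result_from_text : Prop := ∀ (text : String), Dom_extract_result_from_text text → Spec_extract_result_from_text text (extract_result_from_text text)

-- ===== LEMMAS AND PROOFS =====

lemma foldl_fst (ls : List String) :
    ∀ (j v l : Option String), (ls.foldl pvStepB (j, v, l)).1 = j.orElse (fun _ => pvLoop1 ls) := by
  induction ls with
  | nil => intro j v l; cases j <;> simp [pvLoop1]
  | cons a rest ih =>
    intro j v l
    rw [List.foldl_cons, pvLoop1]
    cases j with
    | some x => simpa [pvStepB] using ih _ _ _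
    | none =>
      simp only [pvStepB, pvIsJsonLine, Option.isNone_none, Bool.true_and, ih, Option.orElse_none]
      split_ifs <;> simp_all

lemma foldl_snd (ls : List String) :
    ∀ (j v l : Option String), (ls.foldl pvStepB (j, v, l)).2.1 = v.orElse (fun _ => pvLoop2 ls) := by
  induction ls with
  | nil => intro j v l; cases v <;> simp [pvLoop2]
  | cons a rest ih =>
    intro j v l
    rw [List.foldl_cons, pvLoop2]
    cases v with
    | some x => simpa [pvStepB] using ih _ _ _
    | none =>
      simp only [pvStepB, pvIsValueLine, pvIsFence, Option.isNone_none, Bool.true_and, ih,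
        Option.orElse_none]
      split_ifs with h1 h2 h3 h4 h5 <;> simp_all

lemma loop3_append (xs : List String) (a : String) :
    pvLoop3 (xs ++ [a]) = (pvLoop3 xs).orElse (fun _ => pvLoop3 [a]) := by
  induction xs with
  | nil => simp [pvLoop3]
  | cons b rest ih =>
    rw [List.cons_append, pvLoop3]
    conv_rhs => rw [pvLoop3]
    split_ifs with h
    · simp
    · simp [ih]

lemma foldl_thd (ls : List String) :
    ∀ (j v l : Option String), (ls.foldl pvStepB (j, v, l)).2.2
      = (pvLoop3 ls.reverse).orElse (fun _ => l) := by
  induction ls with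
  | nil => intro j v l; simp [pvLoop3]
  | cons a rest ih =>
    intro j v l
    rw [List.foldl_cons, List.reverse_cons, loop3_append]
    rw [ih]
    cases hlr : pvLoop3 rest.reverse with
    | some x => simp
    | none =>
      simp only [Option.orElse_none, pvStepB, pvIsFence, pvLoop3]
      split_ifs <;> simp_all

-- ===== VERDICT (by name: the statement is the Claim_ definition above) =====
theorem extract_result_from_text_spec : Claim_equal_extract_result_from_text := by
  intro text _
  show extract_result_from_text text = extract_result_from_text_alt text
  unfold extract_result_from_text extract_result_from_text_alt
  simp only [foldl_fst, foldl_snd, foldl_thd, Option.orElse_none]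
  cases pvLoop1 ((PySem.Str.split? (PySem.Str.strip text) "\n").getD []) with
  | some r => rfl
  | none =>
    cases pvLoop2 ((PySem.Str.split? (PySem.Str.strip text) "\n").getD []) with
    | some r => rfl
    | none =>
      simp
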